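-- pv_equiv track=rewrite | github.com/Akua-Serwaa-Nkrumah/CompetitiveProgramming-master | CompetitiveProgramming-master/Camp/Contests/Week3/ShiftingStacks.py | ShiftStacks
-- ===== SOURCE A (Python) =====
-- def ShiftStacks(n,h):
--     extra = 0
--     for i in range(n):
--         if h[i] >= i:
--             extra += (h[i]-i)
--
--         elif h[i]+extra >= i:
--             extra -= (i-h[i])
--
--         else:
--             return "NO"
--
--     return "YES"
-- ===== SOURCE B (Python) =====
-- def ShiftStacks(n, h):
--     # Divide and conquer: let d[i] = h[i] - i; the arrangement is possible iff every
--     # nonempty prefix of d has a nonnegative sum.  scan(lo, hi) returns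
--     # (sum of d[lo:hi], minimum nonempty-prefix sum of d[lo:hi]) by recursion on halves,
--     # using min-prefix(a ++ b) = min(min-prefix(a), sum(a) + min-prefix(b)).
--     d = [h[i] - i for i in range(n)]
--     if not d:
--         return "YES"
--
--     def scan(lo, hi):
--         if hi - lo == 1:
--             return d[lo], d[lo]
--         mid = (lo + hi) // 2
--         s1, m1 = scan(lo, mid)
--         s2, m2 = scan(mid, hi)
--         return s1 + s2, min(m1, s1 + m2)
--
--     return "YES" if scan(0, len(d))[1] >= 0 else "NO"
-- ===== Notes on version B (the rewrite author's own statement) =====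
-- stated objective: alternative
-- what changed: Replaces A's single left-to-right pass with a three-way branching accumulator by a divide-and-conquer recursion: B forms the deficit list d[i]=h[i]-i and computes (segment sum, minimum nonempty-prefix sum) on halves via min-prefix(a++b)=min(min-prefix(a), sum(a)+min-prefix(b)), answering YES iff the minimum prefix sum is nonnegative.
-- outside the precondition, e.g. on ShiftStacks(2, [-1]): A returns 'NO', B raises IndexError
import Mathlib
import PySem

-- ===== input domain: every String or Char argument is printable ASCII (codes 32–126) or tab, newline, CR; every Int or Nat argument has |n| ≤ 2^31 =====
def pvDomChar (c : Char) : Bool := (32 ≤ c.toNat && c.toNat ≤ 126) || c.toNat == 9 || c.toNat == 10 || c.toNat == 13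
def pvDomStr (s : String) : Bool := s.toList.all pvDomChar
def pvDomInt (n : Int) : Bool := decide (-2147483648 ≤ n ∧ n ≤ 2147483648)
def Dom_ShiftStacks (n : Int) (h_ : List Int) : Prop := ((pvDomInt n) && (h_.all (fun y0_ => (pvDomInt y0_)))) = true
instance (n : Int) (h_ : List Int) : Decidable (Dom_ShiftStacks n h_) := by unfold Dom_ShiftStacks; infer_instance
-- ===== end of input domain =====

-- B replaces A's single branching-accumulator pass by a divide-and-conquer recursion on the
-- deficit list d[i] = h[i] - i, combining (sum, min nonempty-prefix sum) of halves
-- (objective: alternative; same linear-ish cost).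

-- ===== PORT A =====
-- loop 'for i in range(n)' with early return, state: extra
def pvGoA (h : List Int) : List Int → Int → String
  | [], _ => "YES"
  | i :: rest, extra =>
    let hi := PySem.List.pyGetD h i 0
    if i ≤ hi then pvGoA h rest (extra + (hi - i))
    else if i ≤ hi + extra then pvGoA h rest (extra - (i - hi))
    else "NO"

def ShiftStacks (n : Int) (h_ : List Int) : String :=
  pvGoA h_ (PySem.List.pyRange 0 n 1) 0

-- ===== PORT B =====
-- d = [h[i] - i for i in range(n)]
def pvDlist (n : Int) (h : List Int) : List Int :=
  (PySem.List.pyRange 0 n 1).map (fun i => PySem.List.pyGetD h i 0 - i)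

-- scan(lo, hi): (sum, min nonempty-prefix sum) of d[lo:hi].  The structural fuel parameter
-- (an upper bound on hi - lo, which shrinks at every call) only makes the recursion total;
-- Python's base test 'hi - lo == 1' is written 'hi - lo ≤ 1' for the same reason
-- (scan is only called with lo < hi and the fuel is never exhausted there).
def pvScan (d : List Int) : Nat → Int → Int → Int × Int
  | 0, lo, _ =>
    let x := PySem.List.pyGetD d lo 0
    (x, x)
  | fuel + 1, lo, hi =>
    if hi - lo ≤ 1 then
      let x := PySem.List.pyGetD d lo 0
      (x, x)
    else
      let mid := PySem.Int.floordiv (lo + hi) 2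
      let p1 := pvScan d fuel lo mid
      let p2 := pvScan d fuel mid hi
      (p1.1 + p2.1, min p1.2 (p1.1 + p2.2))

def ShiftStacks_alt (n : Int) (h_ : List Int) : String :=
  let d := pvDlist n h_
  if d.isEmpty then "YES"
  else if 0 ≤ (pvScan d d.length 0 (d.length : Int)).2 then "YES" else "NO"

-- ===== PRECONDITION & SPEC =====
-- Pre_ excludes exactly the inputs with n > len(h): there Python A raises IndexError at the
-- first missing index unless an earlier index already fails (then A returns "NO"), while B's
-- list comprehension always raises IndexError on such inputs.
def Pre_ShiftStacks (n : Int) (h_ : List Int) : Prop := n ≤ (h_.length : Int)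
instance (n : Int) (h_ : List Int) : Decidable (Pre_ShiftStacks n h_) := by
  unfold Pre_ShiftStacks; infer_instance

def pvWitness_ShiftStacks : Int × List Int := (2, [1, 0])

def Spec_ShiftStacks (n : Int) (h_ : List Int) (out : String) : Prop := out = ShiftStacks_alt n h_
instance (n : Int) (h_ : List Int) (out : String) : Decidable (Spec_ShiftStacks n h_ out) := by
  unfold Spec_ShiftStacks; infer_instance

-- ===== CLAIM =====
def Claim_equal_ShiftStacks : Prop := ∀ (n : Int) (h_ : List Int), Dom_ShiftStacks n h_ → Pre_ShiftStacks n h_ → Spec_ShiftStacks n h_ (ShiftStacks n h_)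

-- ===== LEMMAS AND PROOFS =====

-- minimum of the sums of the nonempty prefixes
def pvMinPref : List Int → Int
  | [] => 0
  | [x] => x
  | x :: y :: t => min x (x + pvMinPref (y :: t))

lemma minPref_cons (x : Int) (l : List Int) (hl : l ≠ []) :
    pvMinPref (x :: l) = min x (x + pvMinPref l) := by
  cases l with
  | nil => exact absurd rfl hl
  | cons y t => rfl

lemma minPref_append (a b : List Int) (ha : a ≠ []) (hb : b ≠ []) :
    pvMinPref (a ++ b) = min (pvMinPref a) (a.sum + pvMinPref b) := by
  induction a with
  | nil => exact absurd rfl ha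
  | cons x a' ih =>
    cases a' with
    | nil => simp [minPref_cons x b hb, pvMinPref]
    | cons y t =>
      rw [List.cons_append, minPref_cons x _ (by simp), ih (by simp),
          minPref_cons x (y :: t) (by simp)]
      simp only [List.sum_cons]
      omega

-- pvScan computes (segment sum, pvMinPref of the segment) on d[lo:hi]
lemma scan_spec (d : List Int) : ∀ (fuel : Nat) (lo hi : Int), (hi - lo).toNat ≤ fuel →
    0 ≤ lo → lo < hi → hi ≤ (d.length : Int) →
    pvScan d fuel lo hi = (((d.drop lo.toNat).take (hi - lo).toNat).sum,
                           pvMinPref ((d.drop lo.toNat).take (hi - lo).toNat)) := by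
  intro fuel
  induction fuel with
  | zero => intro lo hi hk _ hlt _; omega
  | succ k ih =>
    intro lo hi hk h0 hlt hle
    have hltn : (lo.toNat : Int) = lo := Int.toNat_of_nonneg h0
    rw [pvScan]
    by_cases hb : hi - lo ≤ 1
    · rw [if_pos hb]
      have hhi : hi = lo + 1 := by omega
      subst hhi
      have hlen : lo.toNat < d.length := by omega
      have h1 : (lo + 1 - lo).toNat = 1 := by omega
      rw [h1, List.drop_eq_getElem_cons hlen, List.take_succ_cons, List.take_zero,
          PySem.List.pyGetD_eq_getElem d 0 h0 (by omega)]
      simp [pvMinPref]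
    · rw [if_neg hb]
      dsimp only
      have hmid : PySem.Int.floordiv (lo + hi) 2 = (lo + hi) / 2 :=
        PySem.Int.floordiv_eq_ediv_of_pos (by norm_num)
      set mid := PySem.Int.floordiv (lo + hi) 2 with hmiddef
      have hm1 : lo < mid := by omega
      have hm2 : mid < hi := by omega
      rw [ih lo mid (by omega) h0 hm1 (by omega),
          ih mid hi (by omega) (by omega) hm2 hle]
      have hsplit : (hi - lo).toNat = (mid - lo).toNat + (hi - mid).toNat := by omega
      have hdd : (d.drop lo.toNat).drop (mid - lo).toNat = d.drop mid.toNat := by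
        rw [List.drop_drop]; congr 1; omega
      rw [hsplit, List.take_add, hdd]
      have hna : (d.drop lo.toNat).take (mid - lo).toNat ≠ [] := by
        apply List.ne_nil_of_length_pos
        rw [List.length_take, List.length_drop]
        omega
      have hnb : (d.drop mid.toNat).take (hi - mid).toNat ≠ [] := by
        apply List.ne_nil_of_length_pos
        rw [List.length_take, List.length_drop]
        omega
      rw [minPref_append _ _ hna hnb, List.sum_append]

-- 'all prefix sums starting from acc stay nonnegative' — the semantics of A's loop
def pvPrefOk : List Int → Int → Bool
  | [], _ => true
  | x :: r, acc => (0 ≤ acc + x) && pvPrefOk r (acc + x)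

lemma goA_char (h : List Int) : ∀ (L : List Int) (extra : Int), 0 ≤ extra →
    pvGoA h L extra =
      if pvPrefOk (L.map (fun i => PySem.List.pyGetD h i 0 - i)) extra then "YES" else "NO" := by
  intro L
  induction L with
  | nil => intro extra _; simp [pvGoA, pvPrefOk]
  | cons i rest ih =>
    intro extra hex
    simp only [pvGoA, List.map_cons, pvPrefOk]
    set hi := PySem.List.pyGetD h i 0 with hhi
    by_cases h1 : i ≤ hi
    · rw [if_pos h1, ih (extra + (hi - i)) (by omega)]
      simp only [← hhi]
      simp [show (0:Int) ≤ extra + (hi - i) from by omega]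
    · rw [if_neg h1]
      by_cases h2 : i ≤ hi + extra
      · rw [if_pos h2, show extra - (i - hi) = extra + (hi - i) from by ring,
            ih (extra + (hi - i)) (by omega)]
        simp only [← hhi]
        simp [show (0:Int) ≤ extra + (hi - i) from by omega]
      · rw [if_neg h2]
        simp only [← hhi]
        simp [show ¬ (0:Int) ≤ extra + (hi - i) from by omega]

lemma prefOk_minPref : ∀ (ds : List Int) (acc : Int), ds ≠ [] →
    pvPrefOk ds acc = decide (0 ≤ acc + pvMinPref ds) := by
  intro ds
  induction ds with
  | nil => intro acc h; exact absurd rfl h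
  | cons x r ih =>
    intro acc _
    cases r with
    | nil => simp [pvPrefOk, pvMinPref]
    | cons y t =>
      rw [show pvPrefOk (x :: y :: t) acc = ((0 ≤ acc + x : Bool) && pvPrefOk (y :: t) (acc + x)) from rfl,
          ih (acc + x) (by simp), minPref_cons x (y :: t) (by simp)]
      by_cases h1 : (0 : Int) ≤ acc + x
      · by_cases h2 : (0 : Int) ≤ acc + x + pvMinPref (y :: t) <;> simp [h1, h2] <;> omega
      · simp [h1]; omega

-- ===== VERDICT =====
theorem ShiftStacks_spec : Claim_equal_ShiftStacks := by
  intro n h_ _ _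
  unfold Spec_ShiftStacks ShiftStacks ShiftStacks_alt pvDlist
  rw [goA_char h_ _ 0 le_rfl]
  dsimp only
  set d := (PySem.List.pyRange 0 n 1).map (fun i => PySem.List.pyGetD h_ i 0 - i) with hd
  by_cases hemp : d = []
  · simp [hemp, pvPrefOk]
  · have hlen : 0 < d.length := List.length_pos_of_ne_nil hemp
    rw [scan_spec d d.length 0 (d.length : Int) (by simp) (by omega) (by exact_mod_cast hlen) le_rfl]
    rw [prefOk_minPref d 0 hemp]
    simp [hemp, List.isEmpty_iff]
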